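-- pv_equiv track=rewrite | github.com/CarsonCCHsieh/ad-procurement-demo | usadanews-code-snapshot/ops/run_maint_actions.py | parse_action_item
-- ===== SOURCE A (Python) =====
-- def parse_action_item(item):
--     """
--     Examples:
--       status
--       missing sample=1200
--       avatar_diagnose_raw sample=8000 timeout=300
--     """
--     item = (item or '').strip()
--     if not item:
--         return None
--     parts = item.split()
--     action = parts[0].strip()
--     timeout = None
--     extra_qs = []
--     for p in parts[1:]:
--         if '=' not in p:
--             continue
--         k, v = p.split('=', 1)
--         k = k.strip()
--         v = v.strip()
--         if k == 'timeout':
--             try: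
--                 timeout = int(v)
--             except Exception:
--                 timeout = None
--         else:
--             extra_qs.append((k, v))
--     return action, timeout, extra_qs
-- ===== SOURCE B (Python) =====
-- def parse_action_item(item):
--     item = (item or '').strip()
--     if not item:
--         return None
--     parts = item.split()
--     # one comprehension builds all (key, value) pairs in order
--     pairs = [tuple(s.strip() for s in p.split('=', 1)) for p in parts[1:] if '=' in p]
--     tvals = [v for k, v in pairs if k == 'timeout']
--     timeout = None
--     if tvals:
--         try:
--             timeout = int(tvals[-1])
--         except Exception:
--             timeout = None
--     extra_qs = [(k, v) for k, v in pairs if k != 'timeout']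
--     return parts[0].strip(), timeout, extra_qs
-- ===== Notes on version B (the rewrite author's own statement) =====
-- stated objective: simpler
-- what changed: Replaces A's single fold that threads mixed state through the token loop with a two-pass decomposition: one comprehension builds the ordered key-value pair list, then the timeout field is derived from the last matching pair and the extras by filtering.
import Mathlib
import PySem

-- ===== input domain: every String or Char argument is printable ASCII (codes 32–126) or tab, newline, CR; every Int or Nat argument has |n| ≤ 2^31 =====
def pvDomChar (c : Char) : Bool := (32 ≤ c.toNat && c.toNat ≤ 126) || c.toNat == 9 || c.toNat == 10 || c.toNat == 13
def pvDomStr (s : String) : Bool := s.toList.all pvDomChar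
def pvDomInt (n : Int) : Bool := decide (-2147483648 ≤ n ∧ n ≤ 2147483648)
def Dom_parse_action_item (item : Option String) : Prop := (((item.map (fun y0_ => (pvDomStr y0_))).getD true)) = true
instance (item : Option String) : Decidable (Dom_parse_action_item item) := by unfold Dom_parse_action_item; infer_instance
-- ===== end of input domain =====

-- B parses in two passes (build the ordered (k,v) pair list once, then derive timeout from the
-- last 'timeout' pair and extras by filtering) instead of A's single fold with mixed state; objective: simpler.

-- ===== PORT A =====
-- A's loop body: fold over the remaining tokens with state (timeout, extra_qs)
def parse_action_item (item : Option String) : Option (String × Option Int × (List (String × String))) :=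
  let s := PySem.Str.strip (item.getD "")
  if s = "" then none
  else
    let parts := PySem.Str.split₀ s
    -- parts[0]: split of a nonempty stripped string is always nonempty, so headD's default is unreachable
    let action := PySem.Str.strip (parts.headD "")
    let st := (parts.drop 1).foldl (fun (st : Option Int × List (String × String)) p =>
      if PySem.Str.isIn "=" p then
        -- k, v = p.split('=', 1): '=' ∈ p gives exactly two pieces (the getD defaults are unreachable)
        let pieces := (PySem.Str.splitMax? p "=" 1).getD []
        let k := PySem.Str.strip (pieces.getD 0 "")
        let v := PySem.Str.strip (pieces.getD 1 "")
        if k = "timeout" then (PySem.Int.ofStr? v, st.2)  -- try: int(v) except: None is exactly ofStr?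
        else (st.1, st.2 ++ [(k, v)])
      else st) (none, [])
    some (action, st.1, st.2)

-- ===== PORT B =====
-- B-side helper: the (k, v) pair a token contributes, if it contains '='
def tokPair (p : String) : Option (String × String) :=
  if PySem.Str.isIn "=" p then
    -- '=' ∈ p gives exactly two pieces; the getD defaults are unreachable
    let pieces := (PySem.Str.splitMax? p "=" 1).getD []
    some (PySem.Str.strip (pieces.getD 0 ""), PySem.Str.strip (pieces.getD 1 ""))
  else none

def parse_action_item_alt (item : Option String) : Option (String × Option Int × (List (String × String))) :=
  let s := PySem.Str.strip (item.getD "")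
  if s = "" then none
  else
    let parts := PySem.Str.split₀ s
    let pairs := (parts.drop 1).filterMap tokPair
    let tvals := (pairs.filter (fun kv => kv.1 == "timeout")).map Prod.snd
    -- int(tvals[-1]) if tvals else None, with try/except: exactly getLast?.bind ofStr?
    let timeout : Option Int := tvals.getLast?.bind PySem.Int.ofStr?
    let extra_qs := pairs.filter (fun kv => kv.1 != "timeout")
    some (PySem.Str.strip (parts.headD ""), timeout, extra_qs)

-- ===== PRECONDITION & SPEC =====
def Spec_parse_action_item (item : Option String) (out : Option (String × Option Int × (List (String × String)))) : Prop := out = parse_action_item_alt item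
instance (item : Option String) (out : Option (String × Option Int × (List (String × String)))) : Decidable (Spec_parse_action_item item out) := by unfold Spec_parse_action_item; infer_instance

-- ===== CLAIM (what is proved, stated in full; the proofs are below) =====
def Claim_equal_parse_action_item : Prop := ∀ (item : Option String), Dom_parse_action_item item → Spec_parse_action_item item (parse_action_item item)

-- ===== LEMMAS AND PROOFS =====

-- A's per-token step, named for the proof
def stepA (st : Option Int × List (String × String)) (p : String) : Option Int × List (String × String) :=
  if PySem.Str.isIn "=" p then
    let pieces := (PySem.Str.splitMax? p "=" 1).getD []
    let k := PySem.Str.strip (pieces.getD 0 "")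
    let v := PySem.Str.strip (pieces.getD 1 "")
    if k = "timeout" then (PySem.Int.ofStr? v, st.2)
    else (st.1, st.2 ++ [(k, v)])
  else st

-- B's timeout derivation, named for the proof
def tOf (pairs : List (String × String)) (t : Option Int) : Option Int :=
  (((pairs.filter (fun kv => kv.1 == "timeout")).map Prod.snd).getLast?).elim t PySem.Int.ofStr?

lemma elim_none_eq_bind (o : Option String) :
    o.elim none PySem.Int.ofStr? = o.bind PySem.Int.ofStr? := by cases o <;> rfl

-- A's step expressed through tokPair
lemma stepA_eq (st : Option Int × List (String × String)) (p : String) :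
    stepA st p =
      match tokPair p with
      | none => st
      | some (k, v) =>
        if k = "timeout" then (PySem.Int.ofStr? v, st.2) else (st.1, st.2 ++ [(k, v)]) := by
  unfold stepA tokPair
  cases h : PySem.Str.isIn "=" p
  · simp only [Bool.false_eq_true, if_false]
  · simp only [if_true]

lemma tOf_cons_timeout (v : String) (ps : List (String × String)) (t : Option Int) :
    tOf (("timeout", v) :: ps) t = tOf ps (PySem.Int.ofStr? v) := by
  unfold tOf
  simp only [List.filter_cons, beq_self_eq_true, if_true, List.map_cons, List.getLast?_cons]

  rcases h : ((ps.filter (fun kv => kv.1 == "timeout")).map Prod.snd).getLast? with _ | w <;>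
    simp [h]

lemma tOf_cons_other (k v : String) (hk : k ≠ "timeout") (ps : List (String × String)) (t : Option Int) :
    tOf ((k, v) :: ps) t = tOf ps t := by
  unfold tOf
  simp [hk]

-- loop invariant: A's fold = B's two derived passes over the pair list
lemma loop_eq (rest : List String) (t : Option Int) (e : List (String × String)) :
    rest.foldl stepA (t, e) =
      (tOf (rest.filterMap tokPair) t,
       e ++ (rest.filterMap tokPair).filter (fun kv => kv.1 != "timeout")) := by
  induction rest generalizing t e with
  | nil => simp [tOf]
  | cons p rest ih =>
    simp only [List.foldl_cons, List.filterMap_cons]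
    rw [stepA_eq]
    rcases hp : tokPair p with _ | ⟨k, v⟩
    · exact ih t e
    · by_cases hk : k = "timeout"
      · subst hk
        simp only [if_true]
        rw [ih, tOf_cons_timeout]
        simp
      · simp only [hk, if_false]
        rw [ih, tOf_cons_other k v hk]
        simp [hk]

-- ===== VERDICT (by name: the statement is the Claim_ definition above) =====
theorem parse_action_item_spec : Claim_equal_parse_action_item := by
  intro item _
  unfold Spec_parse_action_item
  unfold parse_action_item parse_action_item_alt
  by_cases hs : PySem.Str.strip (item.getD "") = ""
  · rw [if_pos hs, if_pos hs]
  · rw [if_neg hs, if_neg hs]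
    have h := loop_eq ((PySem.Str.split₀ (PySem.Str.strip (item.getD ""))).drop 1) none []
    have hfold : ((PySem.Str.split₀ (PySem.Str.strip (item.getD ""))).drop 1).foldl stepA (none, []) =
        ((PySem.Str.split₀ (PySem.Str.strip (item.getD ""))).drop 1).foldl
          (fun (st : Option Int × List (String × String)) p =>
            if PySem.Str.isIn "=" p then
              let pieces := (PySem.Str.splitMax? p "=" 1).getD []
              let k := PySem.Str.strip (pieces.getD 0 "")
              let v := PySem.Str.strip (pieces.getD 1 "")
              if k = "timeout" then (PySem.Int.ofStr? v, st.2)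
              else (st.1, st.2 ++ [(k, v)])
            else st) (none, []) := rfl
    rw [hfold] at h
    simp only [h, tOf, List.nil_append, elim_none_eq_bind]
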